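-- pv_equiv track=rewrite | github.com/kimdy003/Python_study | 4_etc/mobis/1.py | solution
-- ===== SOURCE A (Python) =====
-- def solution(dice):
--     answer = 0
--     num = [[0, i] for i in range(10)]
--
--     for dic in dice:
--         for d in set(dic):
--             num[d][0] += 1
--
--     num.sort(key=lambda x: x[0])
--     length = len(dice)
--     for n in num:
--         if n[0] < length and n[1] != 0:
--             ans = str(n[1]) * (n[0] + 1)
--             return int(ans)
-- ===== SOURCE B (Python) =====
-- def solution(dice):
--     counts = [0] * 10
--     for die in dice:
--         for v in set(die):
--             counts[v] += 1
--     best_d, best_c = 0, len(dice)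
--     for d in range(1, 10):
--         if counts[d] < best_c:
--             best_d, best_c = d, counts[d]
--     if best_d == 0:
--         return 0
--     return int(str(best_d) * (best_c + 1))
-- ===== Notes on version B (the rewrite author's own statement) =====
-- stated objective: simpler
-- what changed: Keeps the per-die distinct-value count (a plain length-10 counter array instead of A's mutable [count, digit] pair table) but replaces A's stable sort by count plus scan-for-first-qualifying-entry with a single running-minimum pass over the digits 1..9 (strict < keeps the smallest digit on count ties), returning 0 when no digit qualifies.
-- outside the precondition, e.g. on solution([]): A returns None, B returns 0
import Mathlib
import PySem

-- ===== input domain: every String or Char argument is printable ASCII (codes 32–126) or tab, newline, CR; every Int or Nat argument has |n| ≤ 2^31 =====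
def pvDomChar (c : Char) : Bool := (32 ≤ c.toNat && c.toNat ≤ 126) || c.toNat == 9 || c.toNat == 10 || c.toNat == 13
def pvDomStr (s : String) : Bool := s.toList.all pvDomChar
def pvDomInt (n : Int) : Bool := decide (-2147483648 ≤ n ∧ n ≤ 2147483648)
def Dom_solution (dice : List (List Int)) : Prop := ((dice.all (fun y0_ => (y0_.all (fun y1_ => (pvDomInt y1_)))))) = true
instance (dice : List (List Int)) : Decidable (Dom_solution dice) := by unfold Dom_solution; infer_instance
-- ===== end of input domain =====

-- B keeps A's per-die distinct-value counting into a length-10 array (same Python list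
-- indexing) but replaces the [count, digit] pair table, the stable sort by count and the
-- scan-for-first-qualifying-entry with one running-minimum pass over the digits 1..9
-- (objective: simpler).

-- ===== PORT A =====
-- int(str(d) * k): Python string repetition, then int(); the `.getD 0` arm is int()'s
-- ValueError, unreachable for a decimal digit d ≠ 0 and k ≥ 1 (exact there).
def pyIntRep (d k : Int) : Int :=
  (PySem.Int.ofChars? ((List.replicate k.toNat (PySem.Int.toChars d)).flatten)).getD 0

-- num[d][0] += 1 : the (possibly negative) index is resolved as Python does; none = IndexError
def pvBump (num : List (Int × Int)) (d : Int) : List (Int × Int) :=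
  match PySem.List.pyIdx? num.length d with
  | some i => num.modify i (fun p => (p.1 + 1, p.2))
  | none => num   -- Python raises IndexError here; excluded by Pre_

def solution (dice : List (List Int)) : Int :=
  let num0 : List (Int × Int) := (PySem.List.pyRange 0 10 1).map (fun i => ((0 : Int), i))
  let num := dice.foldl (fun nm dic => (PySem.Set.ofList dic : List Int).foldl pvBump nm) num0
  let num' := PySem.List.sorted num (fun p => p.1) false
  let length : Int := dice.length
  match num'.find? (fun p => decide (p.1 < length) && decide (p.2 ≠ 0)) with
  | some p => pyIntRep p.2 (p.1 + 1)
  | none => 0   -- Python falls off the loop and returns None here; excluded by Pre_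

-- ===== PORT B =====
-- counts[v] += 1 : the (possibly negative) index is resolved as Python does; none = IndexError
def pvBumpC (counts : List Int) (v : Int) : List Int :=
  match PySem.List.pyIdx? counts.length v with
  | some i => counts.modify i (fun c => c + 1)
  | none => counts   -- Python raises IndexError here; excluded by Pre_

def solution_alt (dice : List (List Int)) : Int :=
  let counts := dice.foldl
    (fun cs die => (PySem.Set.ofList die : List Int).foldl pvBumpC cs)
    (List.replicate 10 (0 : Int))
  let st := (PySem.List.pyRange 1 10 1).foldl
    (fun (st : Int × Int) d =>
      if PySem.List.pyGetD counts d 0 < st.2 then (d, PySem.List.pyGetD counts d 0) else st)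
    ((0 : Int), (dice.length : Int))
  -- counts[d] (the pyGetD default is unreachable: d runs over 1..9 on a 10-entry list)
  if st.1 = 0 then 0 else pyIntRep st.1 (st.2 + 1)

-- ===== PRECONDITION & SPEC =====
-- number of per-die bumps landing on table slot j (a die value v bumps slot v, a negative v
-- the slot 10 + v, as Python indexing does); used only by Pre_ and the proofs
def pvCnt (dice : List (List Int)) (j : ℕ) : Int :=
  (dice.map (fun die =>
    (((PySem.Set.ofList die : List Int).countP
        (fun v => PySem.List.pyIdx? 10 v == some j) : Nat) : Int))).sum

-- Pre_ excludes (a) dice holding a value outside -10..9, on which both A's num[d] and B's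
-- counts[v] raise IndexError, and (b) inputs (including the empty list) on which no slot 1..9
-- stays below len(dice), where A falls off its loop and returns None instead of an int.
def Pre_solution (dice : List (List Int)) : Prop :=
  (∀ die ∈ dice, ∀ x ∈ die, -10 ≤ x ∧ x ≤ 9) ∧
  (∃ j ∈ List.range 10, j ≠ 0 ∧ pvCnt dice j < (dice.length : Int))
instance (dice : List (List Int)) : Decidable (Pre_solution dice) := by
  unfold Pre_solution; infer_instance

def pvWitness_solution : List (List Int) := [[1, 2], [2, 3]]

def Spec_solution (dice : List (List Int)) (out : Int) : Prop := out = solution_alt dice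
instance (dice : List (List Int)) (out : Int) : Decidable (Spec_solution dice out) := by
  unfold Spec_solution; infer_instance

-- ===== CLAIM (what is proved, stated in full; the proofs are below) =====
def Claim_equal_solution : Prop :=
  ∀ (dice : List (List Int)), Dom_solution dice → Pre_solution dice →
    Spec_solution dice (solution dice)

-- ===== LEMMAS AND PROOFS =====

-- effective order of Python's stable sort by first component, on pairs with distinct seconds
def pvLex (a b : Int × Int) : Prop := a.1 < b.1 ∨ (a.1 = b.1 ∧ a.2 < b.2)

theorem pv_idx_some (v : Int) (h0 : -10 ≤ v) (h9 : v ≤ 9) :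
    ∃ j : ℕ, j < 10 ∧ PySem.List.pyIdx? 10 v = some j := by
  simp only [PySem.List.pyIdx?]
  by_cases h : 0 ≤ v
  · refine ⟨v.toNat, by omega, ?_⟩
    rw [if_pos h, if_pos (show v < ((10 : ℕ) : Int) by omega)]
  · refine ⟨10 - (-v).toNat, by omega, ?_⟩
    rw [if_neg h, if_pos (show -((10 : ℕ) : Int) ≤ v by omega)]

theorem pv_modify_map_range {α : Type} {n : ℕ} (f : ℕ → α) (g : α → α) (a : ℕ) (_ : a < n) :
    ((List.range n).map f).modify a g
      = (List.range n).map (fun j => if j = a then g (f j) else f j) := by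
  apply List.ext_getElem
  · simp
  · intro i h1 h2
    simp only [List.getElem_modify, List.getElem_map, List.getElem_range] at *
    by_cases hia : a = i <;> simp [hia]
    · intro h; exact absurd h.symm hia

theorem pv_bump_table (g : ℕ → Int) (v : Int) (j : ℕ) (hj : j < 10)
    (hidx : PySem.List.pyIdx? 10 v = some j) :
    pvBump ((List.range 10).map (fun i => (g i, (i : Int)))) v
      = (List.range 10).map (fun i => (g i + (if i = j then 1 else 0), (i : Int))) := by
  have hlen : ((List.range 10).map (fun i => (g i, (i : Int)))).length = 10 := by simp
  unfold pvBump
  rw [hlen, hidx]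
  show ((List.range 10).map (fun i => (g i, (i : Int)))).modify j (fun p => (p.1 + 1, p.2))
      = _
  rw [pv_modify_map_range _ _ _ hj]
  apply List.map_congr_left
  intro i _
  by_cases hij : i = j <;> simp [hij]

theorem pv_bumpc_list (g : ℕ → Int) (v : Int) (j : ℕ) (hj : j < 10)
    (hidx : PySem.List.pyIdx? 10 v = some j) :
    pvBumpC ((List.range 10).map g) v
      = (List.range 10).map (fun i => g i + (if i = j then 1 else 0)) := by
  have hlen : ((List.range 10).map g).length = 10 := by simp
  unfold pvBumpC
  rw [hlen, hidx]
  show ((List.range 10).map g).modify j (fun c => c + 1) = _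
  rw [pv_modify_map_range _ _ _ hj]
  apply List.map_congr_left
  intro i _
  by_cases hij : i = j <;> simp [hij]

theorem pv_set_fold (s : List Int) (hr : ∀ x ∈ s, -10 ≤ x ∧ x ≤ 9) :
    ∀ g : ℕ → Int,
    s.foldl pvBump ((List.range 10).map (fun i => (g i, (i : Int))))
      = (List.range 10).map (fun i =>
          (g i + ((s.countP (fun v => PySem.List.pyIdx? 10 v == some i) : Nat) : Int),
           (i : Int))) := by
  induction s with
  | nil => intro g; simp
  | cons a t ih =>
    intro g
    obtain ⟨j, hj, hidx⟩ := pv_idx_some a (hr a (by simp)).1 (hr a (by simp)).2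
    simp only [List.foldl_cons]
    rw [pv_bump_table g a j hj hidx]
    rw [ih (fun x hx => hr x (List.mem_cons_of_mem a hx))]
    apply List.map_congr_left
    intro i _
    have hc : (a :: t).countP (fun v => PySem.List.pyIdx? 10 v == some i)
        = t.countP (fun v => PySem.List.pyIdx? 10 v == some i)
          + (if (PySem.List.pyIdx? 10 a == some i) = true then 1 else 0) := by
      simp [List.countP_cons]
    rw [hc]
    by_cases hij : i = j
    · subst hij; simp [hidx]; omega
    · have : (PySem.List.pyIdx? 10 a == some i) = false := by
        simp [hidx]; omega
      simp [hij, this]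

theorem pv_setc_fold (s : List Int) (hr : ∀ x ∈ s, -10 ≤ x ∧ x ≤ 9) :
    ∀ g : ℕ → Int,
    s.foldl pvBumpC ((List.range 10).map g)
      = (List.range 10).map (fun i =>
          g i + ((s.countP (fun v => PySem.List.pyIdx? 10 v == some i) : Nat) : Int)) := by
  induction s with
  | nil => intro g; simp
  | cons a t ih =>
    intro g
    obtain ⟨j, hj, hidx⟩ := pv_idx_some a (hr a (by simp)).1 (hr a (by simp)).2
    simp only [List.foldl_cons]
    rw [pv_bumpc_list g a j hj hidx]
    rw [ih (fun x hx => hr x (List.mem_cons_of_mem a hx))]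
    apply List.map_congr_left
    intro i _
    have hc : (a :: t).countP (fun v => PySem.List.pyIdx? 10 v == some i)
        = t.countP (fun v => PySem.List.pyIdx? 10 v == some i)
          + (if (PySem.List.pyIdx? 10 a == some i) = true then 1 else 0) := by
      simp [List.countP_cons]
    rw [hc]
    by_cases hij : i = j
    · subst hij; simp [hidx]; omega
    · have : (PySem.List.pyIdx? 10 a == some i) = false := by
        simp [hidx]; omega
      simp [hij, this]

theorem pv_num_eq (dice : List (List Int)) (hr : ∀ die ∈ dice, ∀ x ∈ die, -10 ≤ x ∧ x ≤ 9) :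
    dice.foldl (fun nm dic => (PySem.Set.ofList dic : List Int).foldl pvBump nm)
      ((PySem.List.pyRange 0 10 1).map (fun i => ((0 : Int), i)))
      = (List.range 10).map (fun i : ℕ => (pvCnt dice i, (i : Int))) := by
  induction dice using List.reverseRecOn with
  | nil => decide
  | append_singleton t die ih =>
    rw [List.foldl_append]
    rw [ih (fun d hd => hr d (by simp [hd]))]
    simp only [List.foldl_cons, List.foldl_nil]
    rw [pv_set_fold (PySem.Set.ofList die)
      (fun x hx => hr die (by simp) x ((PySem.Set.mem_ofList die x).mp hx))]
    apply List.map_congr_left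
    intro i _
    unfold pvCnt
    rw [List.map_append, List.sum_append]
    simp

theorem pv_counts_eq (dice : List (List Int)) (hr : ∀ die ∈ dice, ∀ x ∈ die, -10 ≤ x ∧ x ≤ 9) :
    dice.foldl (fun cs die => (PySem.Set.ofList die : List Int).foldl pvBumpC cs)
      (List.replicate 10 (0 : Int))
      = (List.range 10).map (fun i : ℕ => pvCnt dice i) := by
  have h0 : List.replicate 10 (0 : Int) = (List.range 10).map (fun _ : ℕ => (0 : Int)) := by
    decide
  rw [h0]
  induction dice using List.reverseRecOn with
  | nil => decide
  | append_singleton t die ih =>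
    rw [List.foldl_append]
    rw [ih (fun d hd => hr d (by simp [hd]))]
    simp only [List.foldl_cons, List.foldl_nil]
    rw [pv_setc_fold (PySem.Set.ofList die)
      (fun x hx => hr die (by simp) x ((PySem.Set.mem_ofList die x).mp hx))]
    apply List.map_congr_left
    intro i _
    unfold pvCnt
    rw [List.map_append, List.sum_append]
    simp

theorem pv_get_counts (g : ℕ → Int) (d : Int) (h1 : 1 ≤ d) (h9 : d ≤ 9) :
    PySem.List.pyGetD ((List.range 10).map g) d 0 = g d.toNat := by
  rw [PySem.List.pyGetD_eq_getElem _ _ (by omega) (by simp; omega)]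
  simp only [List.getElem_map, List.getElem_range]

theorem pv_insert_lex (x : Int × Int) :
    ∀ acc : List (Int × Int), acc.Pairwise pvLex → (∀ y ∈ acc, y.2 < x.2) →
    (PySem.List.insertBy (fun a b => decide (a.1 < b.1)) x acc).Pairwise pvLex := by
  intro acc
  induction acc with
  | nil =>
    intro _ _
    show List.Pairwise pvLex [x]
    exact List.pairwise_singleton pvLex x
  | cons y ys ih =>
    intro hp hlt
    show List.Pairwise pvLex
      (if (decide (x.1 < y.1)) = true then x :: y :: ys
       else y :: PySem.List.insertBy (fun a b => decide (a.1 < b.1)) x ys)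
    by_cases hxy : x.1 < y.1
    · rw [if_pos (by simpa using hxy)]
      refine List.Pairwise.cons ?_ hp
      intro z hz
      rcases List.mem_cons.mp hz with rfl | hz
      · exact Or.inl hxy
      · rcases List.rel_of_pairwise_cons hp hz with h | ⟨h1, _⟩
        · exact Or.inl (lt_trans hxy h)
        · exact Or.inl (h1 ▸ hxy)
    · rw [if_neg (by simpa using hxy)]
      refine List.Pairwise.cons ?_ (ih hp.of_cons (fun z hz => hlt z (by simp [hz])))
      intro z hz
      rw [PySem.List.mem_insertBy] at hz
      rcases hz with rfl | hz
      · rcases lt_or_eq_of_le (not_lt.mp hxy) with h | h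
        · exact Or.inl h
        · exact Or.inr ⟨h, hlt y (by simp)⟩
      · exact List.rel_of_pairwise_cons hp hz

theorem pv_sorted_lex (xs : List (Int × Int)) (h : xs.Pairwise (fun a b => a.2 < b.2)) :
    (PySem.List.sorted xs (fun p => p.1) false).Pairwise pvLex := by
  rw [PySem.List.sorted_eq_foldl_insertBy]
  induction xs using List.reverseRecOn with
  | nil => simp
  | append_singleton t x ih =>
    rw [List.foldl_append]
    simp only [List.foldl_cons, List.foldl_nil]
    rcases List.pairwise_append.mp h with ⟨ht, _, hx⟩
    apply pv_insert_lex
    · exact ih ht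
    · intro y hy
      have : y ∈ t := by
        have hperm := PySem.List.sorted_perm t (fun p : Int × Int => p.1) false
        rw [PySem.List.sorted_eq_foldl_insertBy] at hperm
        exact hperm.mem_iff.mp hy
      exact hx y this x (by simp)

theorem pv_find_min {l : List (Int × Int)} {p : Int × Int → Bool} (hl : l.Pairwise pvLex)
    {x : Int × Int} (hx : l.find? p = some x) :
    p x = true ∧ x ∈ l ∧ ∀ y ∈ l, p y = true → x = y ∨ pvLex x y := by
  induction l with
  | nil => simp at hx
  | cons a t ih =>
    rw [List.find?_cons] at hx
    by_cases hpa : p a = true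
    · simp only [hpa] at hx
      injection hx with hx; subst hx
      refine ⟨hpa, by simp, ?_⟩
      intro y hy _
      rcases List.mem_cons.mp hy with rfl | hy
      · exact Or.inl rfl
      · exact Or.inr (List.rel_of_pairwise_cons hl hy)
    · rw [Bool.not_eq_true] at hpa
      simp only [hpa] at hx
      obtain ⟨h1, h2, h3⟩ := ih hl.of_cons hx
      refine ⟨h1, List.mem_cons_of_mem a h2, ?_⟩
      intro y hy hpy
      rcases List.mem_cons.mp hy with rfl | hy
      · rw [hpa] at hpy; cases hpy
      · exact h3 y hy hpy

theorem pv_bfold (c : Int → Int) (n : Int) (ds : List Int) (hds : ds.Pairwise (· < ·)) :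
    (ds.foldl (fun st d => if c d < st.2 then (d, c d) else st) ((0 : Int), n) = ((0 : Int), n)
       ∧ ∀ d ∈ ds, ¬ c d < n)
    ∨ ((ds.foldl (fun st d => if c d < st.2 then (d, c d) else st) ((0 : Int), n)).1 ∈ ds
       ∧ (ds.foldl (fun st d => if c d < st.2 then (d, c d) else st) ((0 : Int), n)).2
           = c (ds.foldl (fun st d => if c d < st.2 then (d, c d) else st) ((0 : Int), n)).1
       ∧ (ds.foldl (fun st d => if c d < st.2 then (d, c d) else st) ((0 : Int), n)).2 < n
       ∧ ∀ d ∈ ds, c d < n →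
           (ds.foldl (fun st d => if c d < st.2 then (d, c d) else st) ((0 : Int), n)).2 ≤ c d
           ∧ (c d = (ds.foldl (fun st d => if c d < st.2 then (d, c d) else st) ((0 : Int), n)).2
              → (ds.foldl (fun st d => if c d < st.2 then (d, c d) else st) ((0 : Int), n)).1 ≤ d)) := by
  induction ds using List.reverseRecOn with
  | nil => left; simp
  | append_singleton t d ih =>
    rcases List.pairwise_append.mp hds with ⟨ht, _, hlt⟩
    rw [List.foldl_append]
    simp only [List.foldl_cons, List.foldl_nil]
    rcases ih ht with ⟨heq, hall⟩ | ⟨hmem, hval, hltn, hmin⟩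
    · rw [heq]
      by_cases hd : c d < n
      · right
        rw [if_pos hd]
        refine ⟨by simp, rfl, hd, ?_⟩
        intro e he hce
        rcases List.mem_append.mp he with he | he
        · exact absurd hce (hall e he)
        · simp at he; subst he; exact ⟨le_refl _, fun _ => le_refl _⟩
      · left
        rw [if_neg (by simpa using hd)]
        refine ⟨rfl, ?_⟩
        intro e he
        rcases List.mem_append.mp he with he | he
        · exact hall e he
        · simp at he; subst he; exact hd
    · set st := t.foldl (fun st d => if c d < st.2 then (d, c d) else st) ((0 : Int), n) with hst
      by_cases hcd : c d < st.2
      · right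
        rw [if_pos hcd]
        refine ⟨by simp, rfl, lt_trans hcd hltn, ?_⟩
        intro e he _
        rcases List.mem_append.mp he with he | he
        · by_cases hce : c e < n
          · have := (hmin e he hce).1
            exact ⟨le_of_lt (lt_of_lt_of_le hcd this), fun hh => absurd hh (by omega)⟩
          · exact ⟨by omega, fun hh => by omega⟩
        · simp at he; subst he; exact ⟨le_refl _, fun _ => le_refl _⟩
      · right
        rw [if_neg (by simpa using hcd)]
        refine ⟨List.mem_append_left _ hmem, hval, hltn, ?_⟩
        intro e he hce
        rcases List.mem_append.mp he with he | he
        · exact hmin e he hce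
        · simp at he; subst he
          exact ⟨by omega, fun _ => le_of_lt (hlt st.1 hmem e (by simp))⟩

theorem pv_mem_digits {d : Int} (h : d ∈ ([1, 2, 3, 4, 5, 6, 7, 8, 9] : List Int)) :
    1 ≤ d ∧ d ≤ 9 := by
  fin_cases h <;> norm_num

theorem pv_digits_mem {i : ℕ} (h1 : i < 10) (h2 : i ≠ 0) :
    ((i : Int)) ∈ ([1, 2, 3, 4, 5, 6, 7, 8, 9] : List Int) := by
  interval_cases i <;> simp_all

theorem pv_main (dice : List (List Int))
    (hr : ∀ die ∈ dice, ∀ x ∈ die, -10 ≤ x ∧ x ≤ 9)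
    (hex : ∃ j ∈ List.range 10, j ≠ 0 ∧ pvCnt dice j < (dice.length : Int)) :
    solution dice = solution_alt dice := by
  obtain ⟨j0, hj0r, hj00, hj0lt⟩ := hex
  have hj010 := List.mem_range.mp hj0r
  have hnum := pv_num_eq dice hr
  have hcounts := pv_counts_eq dice hr
  have ha : solution dice =
      (match (PySem.List.sorted
          (dice.foldl (fun nm dic => (PySem.Set.ofList dic : List Int).foldl pvBump nm)
            ((PySem.List.pyRange 0 10 1).map (fun i => ((0 : Int), i))))
          (fun p => p.1) false).find?
          (fun p => decide (p.1 < (dice.length : Int)) && decide (p.2 ≠ 0)) with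
       | some p => pyIntRep p.2 (p.1 + 1)
       | none => 0) := rfl
  have halt : solution_alt dice =
      (let counts := dice.foldl
          (fun cs die => (PySem.Set.ofList die : List Int).foldl pvBumpC cs)
          (List.replicate 10 (0 : Int))
       if (([1, 2, 3, 4, 5, 6, 7, 8, 9] : List Int).foldl
            (fun (st : Int × Int) d =>
              if PySem.List.pyGetD counts d 0 < st.2 then (d, PySem.List.pyGetD counts d 0)
              else st)
            ((0 : Int), (dice.length : Int))).1 = 0 then 0
       else pyIntRep
            (([1, 2, 3, 4, 5, 6, 7, 8, 9] : List Int).foldl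
              (fun (st : Int × Int) d =>
                if PySem.List.pyGetD counts d 0 < st.2 then (d, PySem.List.pyGetD counts d 0)
                else st)
              ((0 : Int), (dice.length : Int))).1
            ((([1, 2, 3, 4, 5, 6, 7, 8, 9] : List Int).foldl
              (fun (st : Int × Int) d =>
                if PySem.List.pyGetD counts d 0 < st.2 then (d, PySem.List.pyGetD counts d 0)
                else st)
              ((0 : Int), (dice.length : Int))).2 + 1)) := rfl
  rw [ha, halt, hnum]
  simp only [hcounts]
  set n : Int := (dice.length : Int) with hn
  set tbl : List (Int × Int) :=
    (List.range 10).map (fun i : ℕ => (pvCnt dice i, (i : Int))) with htbl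
  set c : Int → Int :=
    fun d => PySem.List.pyGetD ((List.range 10).map (fun i : ℕ => pvCnt dice i)) d 0 with hcdef
  set st := ([1, 2, 3, 4, 5, 6, 7, 8, 9] : List Int).foldl
    (fun (st : Int × Int) d => if c d < st.2 then (d, c d) else st)
    ((0 : Int), n) with hstdef
  have hc : ∀ d : Int, 1 ≤ d → d ≤ 9 → c d = pvCnt dice d.toNat := by
    intro d h1 h9
    rw [hcdef]
    exact pv_get_counts _ d h1 h9
  -- facts about the table
  have htblmem : ∀ j : ℕ, j < 10 → (pvCnt dice j, (j : Int)) ∈ tbl := by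
    intro j hj
    rw [htbl]
    exact List.mem_map.mpr ⟨j, List.mem_range.mpr hj, rfl⟩
  have htbl_elem : ∀ x ∈ tbl, ∃ i : ℕ, i < 10 ∧ x = (pvCnt dice i, (i : Int)) := by
    intro x hx
    rw [htbl] at hx
    obtain ⟨i, hi, rfl⟩ := List.mem_map.mp hx
    exact ⟨i, List.mem_range.mp hi, rfl⟩
  have htblpair : tbl.Pairwise (fun a b => a.2 < b.2) := by
    rw [htbl, List.pairwise_map]
    refine List.pairwise_lt_range.imp ?_
    intro a b h
    show ((a : Int)) < ((b : Int))
    omega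
  have hlex := pv_sorted_lex tbl htblpair
  have hperm := PySem.List.sorted_perm tbl (fun p : Int × Int => p.1) false
  -- the B-side running minimum
  rcases pv_bfold c n ([1, 2, 3, 4, 5, 6, 7, 8, 9] : List Int) (by decide) with
    ⟨_, hall⟩ | ⟨hbd_mem, hbc, hbcn, hmin⟩
  · exfalso
    have hm := pv_digits_mem hj010 hj00
    apply hall ((j0 : Int)) hm
    rw [hc ((j0 : Int)) (by omega) (by omega)]
    simpa using hj0lt
  · rw [← hstdef] at hbd_mem hbc hbcn hmin
    have hbd9 := pv_mem_digits hbd_mem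
    have hcst : c st.1 = pvCnt dice st.1.toNat := hc st.1 hbd9.1 hbd9.2
    have hcast : ((st.1.toNat : ℕ) : Int) = st.1 := by omega
    have hbdtbl : (pvCnt dice st.1.toNat, st.1) ∈ tbl := by
      have := htblmem st.1.toNat (by omega)
      rwa [hcast] at this
    have hbdsorted : (pvCnt dice st.1.toNat, st.1) ∈ PySem.List.sorted tbl (fun p => p.1) false :=
      hperm.mem_iff.mpr hbdtbl
    have hpbd : (fun p : Int × Int => decide (p.1 < n) && decide (p.2 ≠ 0))
        (pvCnt dice st.1.toNat, st.1) = true := by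
      simp only [Bool.and_eq_true, decide_eq_true_eq]
      refine ⟨?_, by omega⟩
      rw [← hcst, ← hbc]; exact hbcn
    cases hfind : (PySem.List.sorted tbl (fun p => p.1) false).find?
        (fun p => decide (p.1 < n) && decide (p.2 ≠ 0)) with
    | none =>
      exfalso
      have hmem0 : (pvCnt dice j0, ((j0 : ℕ) : Int)) ∈ PySem.List.sorted tbl (fun p => p.1) false :=
        hperm.mem_iff.mpr (htblmem j0 hj010)
      have hnone := List.find?_eq_none.mp hfind _ hmem0
      apply hnone
      simp only [Bool.and_eq_true, decide_eq_true_eq]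
      exact ⟨hj0lt, by omega⟩
    | some x =>
      obtain ⟨hpx, hxmem, hxmin⟩ := pv_find_min hlex hfind
      obtain ⟨i, hi10, hxeq⟩ := htbl_elem x (hperm.mem_iff.mp hxmem)
      simp only [Bool.and_eq_true, decide_eq_true_eq] at hpx
      have hi0 : i ≠ 0 := by
        intro h; subst h; subst hxeq; simp at hpx
      have hdi_mem := pv_digits_mem hi10 hi0
      have hci : c ((i : ℕ) : Int) = pvCnt dice i := by
        rw [hc ((i : ℕ) : Int) (by omega) (by omega)]
        simp
      have hxbd : x = (pvCnt dice st.1.toNat, st.1) := by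
        rcases hxmin _ hbdsorted hpbd with heq | hlt
        · exact heq
        · exfalso
          subst hxeq
          obtain ⟨hile, hieq⟩ := hmin ((i : ℕ) : Int) hdi_mem (by rw [hci]; exact hpx.1)
          rw [hci] at hile hieq
          rcases hlt with hlt | ⟨heq2, hlt2⟩
          · simp only [] at hlt
            rw [← hcst, ← hbc] at hlt
            omega
          · simp only [] at heq2 hlt2
            rw [← hcst, ← hbc] at heq2
            have := hieq (by omega)
            omega
      subst hxbd
      have hbdne : ¬ st.1 = 0 := by omega
      rw [if_neg hbdne]
      rw [show st.2 = pvCnt dice st.1.toNat from hbc.trans hcst]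

-- ===== VERDICT (by name: the statement is the Claim_ definition above) =====
theorem solution_spec : Claim_equal_solution := by
  unfold Claim_equal_solution
  intro dice _ hpre
  unfold Spec_solution
  exact pv_main dice hpre.1 hpre.2
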